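-- pv_equiv track=rewrite | github.com/xysun/md2html | markdown.py | prefix_quote
-- ===== SOURCE A (Python) =====
-- def prefix_quote(data):
--     size = len(data)
--     i = 0
--
--     while i < size and i <= 3 and data[i] == ' ': # allow 3 spaces
--         i += 1
--
--     if i < size and data[i] == '>':
--         if i+1 < size and (data[i+1] in ' \t'): # allow space after >
--             return i + 2
--         else:
--             return i + 1
--     else:
--         return 0
-- ===== SOURCE B (Python) =====
-- def prefix_quote(data):
--     # Pattern-table approach: the marker, if present, is one of the five fixed
--     # prefixes ' '*k + '>' (k = 0..4); test each by slice comparison.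
--     for k in range(5):
--         if data[:k] == ' ' * k and data[k:k+1] == '>':
--             return k + 1 + (data[k+1:k+2] in (' ', '\t'))
--     return 0
-- ===== Notes on version B (the rewrite author's own statement) =====
-- stated objective: alternative
-- what changed: Replaces A's character-by-character index scan with a pattern table: B tests the five possible fixed prefixes ' '*k + '>' (k = 0..4) by slice comparison and adds one for an optional blank after the marker.
import Mathlib
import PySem

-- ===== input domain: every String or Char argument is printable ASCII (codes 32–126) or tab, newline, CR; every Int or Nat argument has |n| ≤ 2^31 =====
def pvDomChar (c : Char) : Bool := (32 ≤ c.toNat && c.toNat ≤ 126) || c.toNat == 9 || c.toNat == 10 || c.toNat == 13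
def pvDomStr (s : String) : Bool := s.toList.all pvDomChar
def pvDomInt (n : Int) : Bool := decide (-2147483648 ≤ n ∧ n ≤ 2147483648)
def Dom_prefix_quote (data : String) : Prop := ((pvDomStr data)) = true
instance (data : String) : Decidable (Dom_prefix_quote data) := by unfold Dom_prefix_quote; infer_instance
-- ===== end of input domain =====

-- B replaces A's character-by-character scan with a table of the five possible fixed prefixes ' '*k + '>' tested by slice comparison (alternative; return-value equivalence proved below).


-- ===== PORT A =====
-- the while loop of A: advance i while i < size and i <= 3 and data[i] == ' '
def pqLoop (l : List Char) (i : Nat) : Nat :=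
  if i < l.length ∧ i ≤ 3 ∧ l[i]? = some ' ' then pqLoop l (i + 1) else i
termination_by 4 - i
decreasing_by omega

def prefix_quote (data : String) : Int :=
  let l := data.toList
  let size := l.length
  let i := pqLoop l 0
  if i < size ∧ l[i]? = some '>' then
    if i + 1 < size ∧ (l[i+1]? = some ' ' ∨ l[i+1]? = some '\t') then (i : Int) + 2
    else (i : Int) + 1
  else 0

-- ===== PORT B =====
-- the for-k-in-range(5) loop of B, tried over the remaining candidate ks
def pqAltTry (l : List Char) : List Nat → Int
  | [] => 0
  | k :: ks =>
    if l.take k = List.replicate k ' ' ∧ (l.drop k).take 1 = ['>'] then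
      -- data[:k] == ' '*k and data[k:k+1] == '>'
      (k : Int) + 1 +
        (if (l.drop (k+1)).take 1 = [' '] ∨ (l.drop (k+1)).take 1 = ['\t'] then 1 else 0)
      -- data[k+1:k+2] in (' ', '\t')
    else pqAltTry l ks

def prefix_quote_alt (data : String) : Int :=
  pqAltTry data.toList [0, 1, 2, 3, 4]

-- ===== PRECONDITION & SPEC =====
def Spec_prefix_quote (data : String) (out : Int) : Prop := out = prefix_quote_alt data
instance (data : String) (out : Int) : Decidable (Spec_prefix_quote data out) := by unfold Spec_prefix_quote; infer_instance

-- ===== CLAIM (what is proved, stated in full; the proofs are below) =====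
def Claim_equal_prefix_quote : Prop := ∀ (data : String), Dom_prefix_quote data → Spec_prefix_quote data (prefix_quote data)

-- ===== LEMMAS AND PROOFS =====

lemma pqLoop_eq (n : Nat) : ∀ i, i ≤ 4 → 4 - i = n → ∀ l : List Char,
    pqLoop l i = i + min ((l.drop i).takeWhile (· == ' ')).length (4 - i) := by
  induction n with
  | zero =>
    intro i hi hni l
    have hi4 : i = 4 := by omega
    subst hi4
    rw [pqLoop]
    simp
  | succ m ih =>
    intro i hi hni l
    have hi3 : i ≤ 3 := by omega
    rw [pqLoop]
    by_cases hc : i < l.length ∧ i ≤ 3 ∧ l[i]? = some ' '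
    · rw [if_pos hc]
      obtain ⟨hlen, -, hsp⟩ := hc
      have hdr : l.drop i = l[i] :: l.drop (i + 1) := List.drop_eq_getElem_cons hlen
      have hli : l[i] = ' ' := by
        have := List.getElem?_eq_some_iff.mp hsp
        exact this.2
      have htw : (l.drop i).takeWhile (· == ' ')
          = ' ' :: (l.drop (i + 1)).takeWhile (· == ' ') := by
        rw [hdr, hli]
        simp [List.takeWhile]
      rw [ih (i + 1) (by omega) (by omega) l, htw]
      simp only [List.length_cons]
      omega
    · rw [if_neg hc]
      have hnil : (l.drop i).takeWhile (· == ' ') = [] := by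
        by_cases hlen : i < l.length
        · have hdr : l.drop i = l[i] :: l.drop (i + 1) := List.drop_eq_getElem_cons hlen
          have hne : l[i] ≠ ' ' := by
            intro h
            exact hc ⟨hlen, hi3, by simp [hlen, h]⟩
          have hbe : (l[i] == ' ') = false := by simpa using hne
          rw [hdr]
          simp [List.takeWhile, hbe]
        · rw [List.drop_eq_nil_of_le (by omega)]
          rfl
      rw [hnil]
      simp

lemma take_one_eq_singleton_iff (xs : List Char) (c : Char) :
    xs.take 1 = [c] ↔ xs.head? = some c := by
  cases xs <;> simp

lemma take_eq_replicate_iff : ∀ (k : Nat) (l : List Char),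
    l.take k = List.replicate k ' ' ↔ k ≤ (l.takeWhile (· == ' ')).length := by
  intro k
  induction k with
  | zero => intro l; simp
  | succ m ih =>
    intro l
    cases l with
    | nil => simp
    | cons a t =>
      by_cases ha : a = ' '
      · subst ha
        simp [List.takeWhile, List.replicate_succ, ih t]
      · have hbe : (a == ' ') = false := by simpa using ha
        simp [List.takeWhile, List.replicate_succ, hbe, ha]

lemma getElem?_lt_takeWhile (l : List Char) (k : Nat)
    (h : k < (l.takeWhile (· == ' ')).length) : l[k]? = some ' ' := by
  obtain ⟨t, ht⟩ := List.takeWhile_prefix (l := l) (· == ' ')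
  have hk : l[k]? = (l.takeWhile (· == ' '))[k]? := by
    conv_lhs => rw [← ht]
    rw [List.getElem?_append_left h]
  rw [hk, List.getElem?_eq_getElem h]
  have hm : (l.takeWhile (· == ' '))[k] ∈ l.takeWhile (· == ' ') := List.getElem_mem _
  have := List.mem_takeWhile_imp hm
  simpa using this

lemma cond_iff (l : List Char) (k : Nat) :
    (l.take k = List.replicate k ' ' ∧ (l.drop k).take 1 = ['>'])
      ↔ (k = (l.takeWhile (· == ' ')).length ∧ l[k]? = some '>') := by
  rw [take_eq_replicate_iff, take_one_eq_singleton_iff, List.head?_drop]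
  constructor
  · rintro ⟨hkt, hgt⟩
    refine ⟨?_, hgt⟩
    rcases Nat.lt_or_ge k (l.takeWhile (· == ' ')).length with hlt | hge
    · exact absurd hgt (by rw [getElem?_lt_takeWhile l k hlt]; simp)
    · omega
  · rintro ⟨hk, hgt⟩
    exact ⟨le_of_eq hk, hgt⟩

lemma pqAltTry_eq (l : List Char) (ks : List Nat) :
    pqAltTry l ks =
      if ((l.takeWhile (· == ' ')).length ∈ ks
          ∧ l[(l.takeWhile (· == ' ')).length]? = some '>') then
        (((l.takeWhile (· == ' ')).length : Nat) : Int) + 1 +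
          (if (l.drop ((l.takeWhile (· == ' ')).length + 1)).take 1 = [' ']
              ∨ (l.drop ((l.takeWhile (· == ' ')).length + 1)).take 1 = ['\t'] then 1 else 0)
      else 0 := by
  set t := (l.takeWhile (· == ' ')).length with hT
  induction ks with
  | nil => simp [pqAltTry]
  | cons k ks ih =>
    rw [pqAltTry]
    by_cases hc : l.take k = List.replicate k ' ' ∧ (l.drop k).take 1 = ['>']
    · rw [if_pos hc]
      obtain ⟨hk, hgt⟩ := (cond_iff l k).mp hc
      rw [← hT] at hk
      subst hk
      have hcond : t ∈ t :: ks ∧ l[t]? = some '>' := ⟨List.mem_cons_self, hgt⟩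
      rw [if_pos hcond]
    · rw [if_neg hc, ih]
      rw [cond_iff, ← hT] at hc
      by_cases hm : t ∈ ks ∧ l[t]? = some '>'
      · have hcond : t ∈ k :: ks ∧ l[t]? = some '>' := ⟨List.mem_cons_of_mem _ hm.1, hm.2⟩
        rw [if_pos hm, if_pos hcond]
      · have hcond : ¬ (t ∈ k :: ks ∧ l[t]? = some '>') := by
          intro h
          rcases List.mem_cons.mp h.1 with he | hin
          · exact hc ⟨he.symm, he ▸ h.2⟩
          · exact hm ⟨hin, h.2⟩
        rw [if_neg hm, if_neg hcond]

-- ===== VERDICT (by name: the statement is the Claim_ definition above) =====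

theorem prefix_quote_spec : Claim_equal_prefix_quote := by
  intro data _
  unfold Spec_prefix_quote prefix_quote prefix_quote_alt
  dsimp only
  generalize data.toList = l
  rw [pqAltTry_eq]
  set t := (l.takeWhile (· == ' ')).length with hT
  have hloop : pqLoop l 0 = min t 4 := by
    have h := pqLoop_eq 4 0 (by omega) (by omega) l
    simpa [← hT] using h
  have hmem : (t ∈ [0, 1, 2, 3, 4]) ↔ t ≤ 4 := by
    simp only [List.mem_cons, List.not_mem_nil, or_false]
    omega
  by_cases hk4 : t ≤ 4
  · rw [hloop, Nat.min_eq_left hk4]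
    by_cases hgt : l[t]? = some '>'
    · have htlen : t < l.length := (List.getElem?_eq_some_iff.mp hgt).1
      have hA1 : t < l.length ∧ l[t]? = some '>' := ⟨htlen, hgt⟩
      have hB1 : t ∈ [0, 1, 2, 3, 4] ∧ l[t]? = some '>' := ⟨hmem.mpr hk4, hgt⟩
      rw [if_pos hA1, if_pos hB1]
      by_cases hsp : l[t+1]? = some ' ' ∨ l[t+1]? = some '\t'
      · have hk1 : t + 1 < l.length := by
          rcases hsp with h | h <;> exact (List.getElem?_eq_some_iff.mp h).1
        have hsp' : (l.drop (t+1)).take 1 = [' '] ∨ (l.drop (t+1)).take 1 = ['\t'] := by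
          rcases hsp with h | h
          · exact Or.inl ((take_one_eq_singleton_iff _ _).mpr (by rw [List.head?_drop]; exact h))
          · exact Or.inr ((take_one_eq_singleton_iff _ _).mpr (by rw [List.head?_drop]; exact h))
        have hA2 : t + 1 < l.length ∧ (l[t+1]? = some ' ' ∨ l[t+1]? = some '\t') := ⟨hk1, hsp⟩
        rw [if_pos hA2, if_pos hsp']
        omega
      · have hsp' : ¬ ((l.drop (t+1)).take 1 = [' '] ∨ (l.drop (t+1)).take 1 = ['\t']) := by
          intro h
          rcases h with h | h
          · exact hsp (Or.inl (by rw [← List.head?_drop]; exact (take_one_eq_singleton_iff _ _).mp h))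
          · exact hsp (Or.inr (by rw [← List.head?_drop]; exact (take_one_eq_singleton_iff _ _).mp h))
        have hA2 : ¬ (t + 1 < l.length ∧ (l[t+1]? = some ' ' ∨ l[t+1]? = some '\t')) :=
          fun h => hsp h.2
        rw [if_neg hA2, if_neg hsp']
        omega
    · have hA1 : ¬ (t < l.length ∧ l[t]? = some '>') := fun h => hgt h.2
      have hB1 : ¬ (t ∈ [0, 1, 2, 3, 4] ∧ l[t]? = some '>') := fun h => hgt h.2
      rw [if_neg hA1, if_neg hB1]
  · rw [hloop, Nat.min_eq_right (by omega)]
    have h4 : l[4]? = some ' ' := getElem?_lt_takeWhile l 4 (by omega)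
    have hA : ¬ (4 < l.length ∧ l[4]? = some '>') := by
      intro h
      rw [h4] at h
      exact absurd h.2 (by simp)
    have hB1 : ¬ (t ∈ [0, 1, 2, 3, 4] ∧ l[t]? = some '>') := fun h => hk4 (hmem.mp h.1)
    rw [if_neg hA, if_neg hB1]
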